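-- pv_equiv track=rewrite | github.com/Razer0028/P3F-Project | portal/server.py | inventory_has_group
-- ===== SOURCE A (Python) =====
-- def inventory_has_group(text, group):
--     if not text:
--         return False
--     header = f"[{group}]"
--     found = False
--     for line in text.splitlines():
--         stripped = line.strip()
--         if not stripped or stripped.startswith("#"):
--             continue
--         if stripped.startswith("[") and stripped.endswith("]"):
--             found = (stripped == header)
--             continue
--         if found:
--             return True
--     return False
-- ===== SOURCE B (Python) =====
-- def inventory_has_group(text, group):
--     header = f"[{group}]"
--     lines = [s for s in (ln.strip() for ln in text.splitlines()) if s and not s.startswith("#")]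
--     return any(a == header and not (b.startswith("[") and b.endswith("]"))
--                for a, b in zip(lines, lines[1:]))
-- ===== Notes on version B (the rewrite author's own statement) =====
-- stated objective: simpler
-- what changed: A scans lines with a mutable 'found' flag and an early return; B filters the stripped non-blank non-comment lines once and checks adjacent pairs: the section is non-empty iff some occurrence of the header is immediately followed by a non-header line.
import Mathlib
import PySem

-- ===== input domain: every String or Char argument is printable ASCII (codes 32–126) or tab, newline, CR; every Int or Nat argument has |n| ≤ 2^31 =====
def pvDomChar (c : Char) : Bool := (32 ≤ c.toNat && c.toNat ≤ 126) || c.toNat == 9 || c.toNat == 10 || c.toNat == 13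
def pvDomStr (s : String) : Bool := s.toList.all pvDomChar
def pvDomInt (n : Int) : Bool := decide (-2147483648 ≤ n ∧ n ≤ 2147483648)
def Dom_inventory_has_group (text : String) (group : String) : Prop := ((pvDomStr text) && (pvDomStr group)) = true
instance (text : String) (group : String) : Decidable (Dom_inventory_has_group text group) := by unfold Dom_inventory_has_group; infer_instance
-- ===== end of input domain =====

-- B replaces A's early-returning scan with filter-the-lines-then-check-adjacent-pairs (simpler decomposition); equivalence is exact on all inputs.

-- ===== PORT A =====
-- the for-loop of A, with its `found` flag and early `return True`
def pvLoopA (header : String) (found : Bool) : List String → Bool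
  | [] => false
  | line :: rest =>
    let stripped := PySem.Str.strip line
    if stripped == "" || PySem.Str.startswith stripped "#" then
      pvLoopA header found rest
    else if PySem.Str.startswith stripped "[" && PySem.Str.endswith stripped "]" then
      pvLoopA header (stripped == header) rest
    else if found then true
    else pvLoopA header found rest

def inventory_has_group (text : String) (group : String) : Bool :=
  if text == "" then false
  else
    let header := "[" ++ group ++ "]"
    pvLoopA header false (PySem.Str.splitlines text)

-- ===== PORT B =====
def inventory_has_group_alt (text : String) (group : String) : Bool :=
  let header := "[" ++ group ++ "]"
  let lines := ((PySem.Str.splitlines text).map PySem.Str.strip).filter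
    (fun s => !(s == "") && !PySem.Str.startswith s "#")
  (lines.zip (PySem.List.slice lines (some 1) none)).any
    (fun p => p.1 == header && !(PySem.Str.startswith p.2 "[" && PySem.Str.endswith p.2 "]"))

-- ===== PRECONDITION & SPEC =====
def Spec_inventory_has_group (text : String) (group : String) (out : Bool) : Prop := out = inventory_has_group_alt text group
instance (text : String) (group : String) (out : Bool) : Decidable (Spec_inventory_has_group text group out) := by unfold Spec_inventory_has_group; infer_instance

-- ===== CLAIM (what is proved, stated in full; the proofs are below) =====
def Claim_equal_inventory_has_group : Prop := ∀ (text : String) (group : String), Dom_inventory_has_group text group → Spec_inventory_has_group text group (inventory_has_group text group)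

-- ===== LEMMAS AND PROOFS =====

-- is this (already stripped) line a header line?
def pvIsHd (s : String) : Bool := PySem.Str.startswith s "[" && PySem.Str.endswith s "]"
-- does A keep this (already stripped) line?
def pvKeep (s : String) : Bool := !(s == "") && !PySem.Str.startswith s "#"

-- A's loop on the pre-stripped, pre-filtered list
def pvLoopF (header : String) (found : Bool) : List String → Bool
  | [] => false
  | s :: rest =>
    if pvIsHd s then pvLoopF header (s == header) rest
    else if found then true
    else pvLoopF header found rest

-- B's pair check on a list
def pvPairs (header : String) (ls : List String) : Bool :=
  (ls.zip ls.tail).any (fun p => p.1 == header && !pvIsHd p.2)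

theorem pvKeep_eq (s : String) :
    pvKeep s = !(s == "" || PySem.Str.startswith s "#") := by
  simp [pvKeep, Bool.not_or]

theorem pvLoopA_eq_pvLoopF (header : String) :
    ∀ (lines : List String) (found : Bool),
      pvLoopA header found lines
        = pvLoopF header found ((lines.map PySem.Str.strip).filter pvKeep) := by
  intro lines
  induction lines with
  | nil => intro found; rfl
  | cons line rest ih =>
    intro found
    by_cases hk : (PySem.Str.strip line == "" || PySem.Str.startswith (PySem.Str.strip line) "#") = true
    · simp only [pvLoopA, hk, if_true, List.map_cons, List.filter_cons, pvKeep_eq,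
        Bool.not_true, Bool.false_eq_true, if_false]
      exact ih _
    · have hk' := eq_false_of_ne_true hk
      simp only [pvLoopA, hk', Bool.false_eq_true, if_false, List.map_cons, List.filter_cons,
        pvKeep_eq, Bool.not_false, if_true, pvLoopF, pvIsHd]
      split
      · exact ih _
      · split
        · rfl
        · exact ih _

theorem pvIsHd_header (group : String) : pvIsHd ("[" ++ group ++ "]") = true := by
  have h : ("[" ++ group ++ "]").toList = '[' :: (group.toList ++ [']']) := by simp
  simp only [pvIsHd, PySem.Str.startswith, PySem.Str.endswith, Bool.and_eq_true,
    PySem.Chars.startswith_iff, PySem.Chars.endswith_iff, h]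
  exact ⟨⟨group.toList ++ [']'], by simp⟩, ⟨'[' :: group.toList, by simp⟩⟩

theorem pvLoopF_eq (header : String) (hh : pvIsHd header = true) :
    ∀ (ls : List String) (found : Bool),
      pvLoopF header found ls
        = (pvPairs header ls
            || (found && (match ls with | [] => false | s :: _ => !pvIsHd s))) := by
  intro ls
  induction ls with
  | nil => intro found; simp [pvLoopF, pvPairs]
  | cons s rest ih =>
    intro found
    by_cases hs : pvIsHd s = true
    · have hne : ∀ t, pvIsHd t = false → (t == header) = false := by
        intro t ht
        by_cases h : t = header
        · rw [h] at ht; rw [hh] at ht; simp at ht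
        · simp [h]
      simp only [pvLoopF, hs, if_true, ih]
      cases rest with
      | nil => simp [pvPairs]
      | cons t r =>
        simp only [pvPairs, List.tail_cons, List.zip_cons_cons, List.any_cons]
        simp [Bool.or_comm]
    · have hs' : pvIsHd s = false := eq_false_of_ne_true hs
      have hne : (s == header) = false := by
        by_cases h : s = header
        · rw [h] at hs'; rw [hh] at hs'; simp at hs'
        · simp [h]
      simp only [pvLoopF, hs', Bool.false_eq_true, if_false]
      have hp : pvPairs header (s :: rest) = pvPairs header rest := by
        cases rest with
        | nil => simp [pvPairs]
        | cons t r =>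
          simp only [pvPairs, List.tail_cons, List.zip_cons_cons, List.any_cons, hne]
          simp
      cases found with
      | false => simp [ih, hp]
      | true => simp [hp]

-- ===== VERDICT (by name: the statement is the Claim_ definition above) =====
theorem inventory_has_group_spec : Claim_equal_inventory_has_group := by
  intro text group _
  unfold Spec_inventory_has_group inventory_has_group inventory_has_group_alt
  simp only [PySem.List.slice_from_one]
  by_cases ht : text = ""
  · subst ht
    have he : PySem.Str.splitlines "" = [] := by decide
    simp [he]
  · simp only [beq_eq_false_iff_ne.mpr ht, Bool.false_eq_true, if_false]
    rw [pvLoopA_eq_pvLoopF, pvLoopF_eq _ (pvIsHd_header group)]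
    have hk : pvKeep = (fun s : String => !s == "" && !PySem.Chars.startswith s.toList ['#']) := by
      funext s; simp [pvKeep, PySem.Str.startswith]
    simp [pvPairs, pvIsHd, hk]
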